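-- pv_equiv track=rewrite | github.com/JimmyMath/Python | HashTables/containsCloseNums.py | containsCloseNums
-- ===== SOURCE A (Python) =====
-- def containsCloseNums(nums, k):
--     D = {}
--     for i in range(len(nums)):
--         if nums[i] in D:
--             D[nums[i]] = D[nums[i]] + [i]
--         else:
--             D[nums[i]] = [i]
--     for v in D.values():
--         if len(v) > 1:
--             for x in v:
--                 for y in v:
--                     if abs(x-y) <= k and x != y:
--                         return True
--     return False
-- ===== SOURCE B (Python) =====
-- def containsCloseNums(nums, k):
--     last = {}
--     for i, v in enumerate(nums):
--         if v in last and i - last[v] <= k: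
--             return True
--         last[v] = i
--     return False
-- ===== Notes on version B (the rewrite author's own statement) =====
-- stated objective: faster
-- what changed: Replaced the build-full-index-groups dict plus quadratic all-pairs scan inside each group by a single pass that keeps only the last-seen index of each value and compares i - last[v] <= k on the fly.
import Mathlib
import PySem

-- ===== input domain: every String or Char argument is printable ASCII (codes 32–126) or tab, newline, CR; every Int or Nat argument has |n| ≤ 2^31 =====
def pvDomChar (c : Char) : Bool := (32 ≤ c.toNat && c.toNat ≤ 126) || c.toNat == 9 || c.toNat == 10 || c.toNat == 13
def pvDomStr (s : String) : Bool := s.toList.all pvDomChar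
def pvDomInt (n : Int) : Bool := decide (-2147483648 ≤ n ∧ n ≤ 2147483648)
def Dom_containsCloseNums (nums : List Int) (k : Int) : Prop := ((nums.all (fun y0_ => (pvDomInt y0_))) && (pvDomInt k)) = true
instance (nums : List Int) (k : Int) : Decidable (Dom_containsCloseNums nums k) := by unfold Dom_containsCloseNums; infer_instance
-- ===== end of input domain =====

-- B replaces A's value→all-indices grouping dict plus within-group all-pairs scan by a single
-- pass that keeps only the last-seen index of each value (objective: faster).

-- ===== PORT A =====
-- first loop of A: D[nums[i]] accumulates the list of indices at which nums[i] occurs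
def aBuild (nums : List Int) : PySem.Dict Int (List Int) :=
  (PySem.List.pyRange 0 (nums.length : Int)).foldl
    (fun d i =>
      if d.contains (PySem.List.pyGetD nums i 0) then
        d.insert (PySem.List.pyGetD nums i 0) (d.getD (PySem.List.pyGetD nums i 0) [] ++ [i])
      else
        d.insert (PySem.List.pyGetD nums i 0) [i])
    PySem.Dict.empty

-- second part of A: early-return triple loop over D.values ('return True' on first hit = any)
def containsCloseNums (nums : List Int) (k : Int) : Bool :=
  (aBuild nums).values.any (fun v =>
    decide (1 < v.length) &&
      v.any (fun x => v.any (fun y => decide (|x - y| ≤ k) && decide (x ≠ y))))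

-- ===== PORT B =====
-- B's loop: early return on a close enough previous occurrence, else record the last-seen index
def altGo (k : Int) : List (Int × Int) → PySem.Dict Int Int → Bool
  | [], _ => false
  | (i, v) :: rest, last =>
    if last.contains v && decide (i - last.getD v 0 ≤ k) then true
    else altGo k rest (last.insert v i)

def containsCloseNums_alt (nums : List Int) (k : Int) : Bool :=
  altGo k (PySem.List.enumerate nums 0) PySem.Dict.empty

-- ===== PRECONDITION & SPEC =====
def Spec_containsCloseNums (nums : List Int) (k : Int) (out : Bool) : Prop := out = containsCloseNums_alt nums k
instance (nums : List Int) (k : Int) (out : Bool) : Decidable (Spec_containsCloseNums nums k out) := by unfold Spec_containsCloseNums; infer_instance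

-- ===== CLAIM (what is proved, stated in full; the proofs are below) =====
def Claim_equal_containsCloseNums : Prop := ∀ (nums : List Int) (k : Int), Dom_containsCloseNums nums k → Spec_containsCloseNums nums k (containsCloseNums nums k)

-- ===== LEMMAS AND PROOFS =====

-- the common characterisation: two positions with equal values at index distance ≤ k
def ClosePair (nums : List Int) (k : Int) : Prop :=
  ∃ a b : Nat, a < b ∧ b < nums.length ∧ nums.getD a 0 = nums.getD b 0 ∧ (b : Int) - (a : Int) ≤ k

lemma one_lt_length_of_mem_ne {α : Type} {x y : α} {l : List α}
    (hx : x ∈ l) (hy : y ∈ l) (hne : x ≠ y) : 1 < l.length := by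
  match l with
  | [] => simp at hx
  | [z] =>
    simp only [List.mem_singleton] at hx hy
    exact absurd (hx.trans hy.symm) hne
  | _ :: _ :: _ => simp only [List.length]; omega

-- A's build loop is the canonical grouping fold
lemma aBuild_eq_modify (nums : List Int) :
    aBuild nums =
      (PySem.List.pyRange 0 (nums.length : Int)).foldl
        (fun d i => d.modify (PySem.List.pyGetD nums i 0) [] (· ++ [i]))
        PySem.Dict.empty := by
  unfold aBuild
  apply PySem.List.foldl_congr_mem'
  intro x _ acc
  by_cases h : acc.contains (PySem.List.pyGetD nums x 0) = true
  · simp only [h, if_true]; rfl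
  · simp only [h]
    show acc.insert _ [x] = acc.insert _ (acc.getD _ [] ++ [x])
    rw [PySem.Dict.getD_of_not_contains _ _ (by simpa using h)]
    rfl

lemma foldl_modify_pair (l : List Int) (key : Int → Int)
    (init : PySem.Dict Int (List Int)) :
    ((l.map (fun i => (key i, i))).foldl (fun d p => d.modify p.1 [] (· ++ [p.2])) init)
      = l.foldl (fun d i => d.modify (key i) [] (· ++ [i])) init := by
  induction l generalizing init with
  | nil => rfl
  | cons x xs ih => simp only [List.map_cons, List.foldl_cons, ih]

lemma aBuild_getD (nums : List Int) (c : Int) :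
    (aBuild nums).getD c [] =
      (PySem.List.pyRange 0 (nums.length : Int)).filter
        (fun i => PySem.List.pyGetD nums i 0 == c) := by
  rw [aBuild_eq_modify]
  rw [← foldl_modify_pair (PySem.List.pyRange 0 (nums.length : Int))
    (fun i => PySem.List.pyGetD nums i 0) PySem.Dict.empty]
  rw [PySem.Dict.getD_foldl_modify_append]
  simp [List.filter_map, Function.comp_def]

lemma aBuild_mem_keys (nums : List Int) (c : Int) :
    c ∈ (aBuild nums).keys ↔
      ∃ i : Int, i ∈ PySem.List.pyRange 0 (nums.length : Int) ∧
        PySem.List.pyGetD nums i 0 = c := by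
  rw [aBuild_eq_modify,
    PySem.Dict.keys_foldl_modify_key _ (fun i => PySem.List.pyGetD nums i 0) [] (fun _ i => (· ++ [i]))]
  rw [show PySem.Dict.empty.keys = ([] : List Int) from PySem.Dict.keys_empty]
  constructor
  · intro h
    rcases (PySem.Set.mem_update _ _ _).mp h with h | h
    · simp at h
    · rcases List.mem_map.mp h with ⟨i, hi, rfl⟩
      exact ⟨i, hi, rfl⟩
  · rintro ⟨i, hi, rfl⟩
    exact (PySem.Set.mem_update _ _ _).mpr (Or.inr (List.mem_map_of_mem hi))

lemma aBuild_nodup_keys (nums : List Int) : (aBuild nums).keys.Nodup := by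
  rw [aBuild_eq_modify]
  exact PySem.Dict.nodup_keys_foldl_modify_key _ _ _ _ _ (by
    rw [show PySem.Dict.empty.keys = ([] : List Int) from PySem.Dict.keys_empty]
    exact List.nodup_nil)

lemma A_iff (nums : List Int) (k : Int) :
    containsCloseNums nums k = true ↔ ClosePair nums k := by
  have hnd := aBuild_nodup_keys nums
  unfold containsCloseNums
  rw [List.any_eq_true]
  constructor
  · rintro ⟨v, hv, hQ⟩
    simp only [PySem.Dict.values] at hv
    rcases List.mem_map.mp hv with ⟨p, hp, rfl⟩
    have hgd : (aBuild nums).getD p.1 [] = p.2 :=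
      PySem.Dict.getD_of_mem_items (aBuild nums) (by exact hp) hnd []
    simp only [Bool.and_eq_true, decide_eq_true_eq, List.any_eq_true] at hQ
    rcases hQ with ⟨-, x, hx, y, hy, habs, hne⟩
    rw [← hgd, aBuild_getD] at hx hy
    rcases List.mem_filter.mp hx with ⟨hxr, hxc⟩
    rcases List.mem_filter.mp hy with ⟨hyr, hyc⟩
    rcases PySem.List.mem_pyRange_one.mp hxr with ⟨hx0, hxn⟩
    rcases PySem.List.mem_pyRange_one.mp hyr with ⟨hy0, hyn⟩
    have hvx := PySem.List.pyGetD_of_nonneg nums (0 : Int) hx0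
    have hvy := PySem.List.pyGetD_of_nonneg nums (0 : Int) hy0
    have hval : nums.getD x.toNat 0 = nums.getD y.toNat 0 := by
      rw [← hvx, ← hvy, beq_iff_eq.mp hxc, beq_iff_eq.mp hyc]
    rw [abs_sub_le_iff] at habs
    rcases lt_or_gt_of_ne hne with hlt | hlt
    · exact ⟨x.toNat, y.toNat, by omega, by omega, hval, by omega⟩
    · exact ⟨y.toNat, x.toNat, by omega, by omega, hval.symm, by omega⟩
  · rintro ⟨a, b, hab, hbn, hval, hk⟩
    set c : Int := nums.getD b 0 with hc
    have hbr : (b : Int) ∈ PySem.List.pyRange 0 (nums.length : Int) :=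
      PySem.List.mem_pyRange_one.mpr ⟨by omega, by exact_mod_cast hbn⟩
    have har : (a : Int) ∈ PySem.List.pyRange 0 (nums.length : Int) :=
      PySem.List.mem_pyRange_one.mpr ⟨by omega, by
        have : a < nums.length := by omega
        exact_mod_cast this⟩
    have hkeys : c ∈ (aBuild nums).keys :=
      (aBuild_mem_keys nums c).mpr ⟨(b : Int), hbr, by simp [hc]⟩
    rcases List.mem_map.mp (by simpa only [PySem.Dict.keys] using hkeys) with ⟨p, hp, hp1⟩
    have hgd : (aBuild nums).getD c [] = p.2 := by
      rw [← hp1]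
      exact PySem.Dict.getD_of_mem_items (aBuild nums) (by exact hp) hnd []
    refine ⟨p.2, by simp only [PySem.Dict.values]; exact List.mem_map_of_mem hp, ?_⟩
    have hocc : p.2 = (PySem.List.pyRange 0 (nums.length : Int)).filter
        (fun i => PySem.List.pyGetD nums i 0 == c) := by
      rw [← hgd, aBuild_getD]
    have hmb : (b : Int) ∈ p.2 := by
      rw [hocc]; exact List.mem_filter.mpr ⟨hbr, by simp [hc]⟩
    have hma : (a : Int) ∈ p.2 := by
      rw [hocc]
      refine List.mem_filter.mpr ⟨har, ?_⟩
      rw [PySem.List.pyGetD_natCast, beq_iff_eq]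
      exact hval
    have hne : (a : Int) ≠ (b : Int) := by
      intro h; exact absurd (by exact_mod_cast h : a = b) (by omega)
    simp only [Bool.and_eq_true, decide_eq_true_eq, List.any_eq_true]
    refine ⟨one_lt_length_of_mem_ne hma hmb hne, (a : Int), hma, (b : Int), hmb, ?_, hne⟩
    rw [abs_sub_le_iff]; omega

-- B-side invariant: the dict stores, for each value, the greatest index of that value so far
def InvB (nums : List Int) (j : Nat) (d : PySem.Dict Int Int) : Prop :=
  ∀ v : Int,
    (d.get? v = none → ∀ a : Nat, a < j → nums.getD a 0 ≠ v) ∧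
    (∀ x : Int, d.get? v = some x →
      ∃ a : Nat, x = (a : Int) ∧ a < j ∧ nums.getD a 0 = v ∧
        ∀ b : Nat, b < j → nums.getD b 0 = v → b ≤ a)

lemma InvB_insert (nums : List Int) (j : Nat) (d : PySem.Dict Int Int)
    (h : InvB nums j d) :
    InvB nums (j + 1) (d.insert (nums.getD j 0) (j : Int)) := by
  intro w
  constructor
  · intro hnone a ha
    rw [PySem.Dict.get?_insert] at hnone
    split at hnone
    · exact absurd hnone (by simp)
    · rename_i hw
      rcases Nat.lt_succ_iff_lt_or_eq.mp ha with ha' | rfl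
      · exact (h w).1 hnone a ha'
      · exact fun hv => hw hv.symm
  · intro x hx
    rw [PySem.Dict.get?_insert] at hx
    split at hx
    · rename_i hw
      refine ⟨j, by simpa using hx.symm, by omega, hw.symm, fun b hb _ => by omega⟩
    · rename_i hw
      rcases (h w).2 x hx with ⟨a, rfl, haj, hav, hmax⟩
      refine ⟨a, rfl, by omega, hav, fun b hb hbv => ?_⟩
      rcases Nat.lt_succ_iff_lt_or_eq.mp hb with hb' | rfl
      · exact hmax b hb' hbv
      · exact absurd hbv (fun hv => hw hv.symm)

lemma altGo_iff (nums : List Int) (k : Int) :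
    ∀ (m j : Nat) (d : PySem.Dict Int Int), nums.length = j + m → InvB nums j d →
      (altGo k (PySem.List.enumerate (nums.drop j) (j : Int)) d = true ↔
        ∃ b : Nat, j ≤ b ∧ b < nums.length ∧ ∃ a : Nat, a < b ∧
          nums.getD a 0 = nums.getD b 0 ∧ (b : Int) - (a : Int) ≤ k) := by
  intro m
  induction m with
  | zero =>
    intro j d hlen _
    rw [List.drop_eq_nil_of_le (by omega)]
    simp only [PySem.List.enumerate_nil, altGo, Bool.false_eq_true, false_iff]
    rintro ⟨b, hb1, hb2, -⟩
    omega
  | succ m ih =>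
    intro j d hlen hinv
    have hj : j < nums.length := by omega
    rw [List.drop_eq_getElem_cons hj, PySem.List.enumerate_cons]
    have hvj : nums.getD j 0 = nums[j] := List.getD_eq_getElem nums 0 hj
    have hstep : ∀ d' : PySem.Dict Int Int, nums.length = (j + 1) + m → InvB nums (j+1) d' →
        (altGo k (PySem.List.enumerate (nums.drop (j+1)) ((j : Int) + 1)) d' = true ↔
          ∃ b : Nat, j + 1 ≤ b ∧ b < nums.length ∧ ∃ a : Nat, a < b ∧
            nums.getD a 0 = nums.getD b 0 ∧ (b : Int) - (a : Int) ≤ k) := by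
      intro d' h1 h2
      have := ih (j + 1) d' h1 h2
      rwa [show ((j : Int) + 1) = (((j + 1 : Nat)) : Int) by push_cast; ring]
    rcases hdv : d.get? nums[j] with _ | x
    · -- value not seen before
      have hcont : d.contains nums[j] = false := by
        rw [PySem.Dict.contains_eq_isSome_get?, hdv]; rfl
      simp only [altGo, hcont, Bool.false_and, Bool.false_eq_true, if_false]
      rw [hstep (d.insert nums[j] (j : Int)) (by omega)
        (by rw [← hvj]; exact InvB_insert nums j d hinv)]
      constructor
      · rintro ⟨b, hb1, hb2, a, ha, hv, hk'⟩
        exact ⟨b, by omega, hb2, a, ha, hv, hk'⟩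
      · rintro ⟨b, hb1, hb2, a, ha, hv, hk'⟩
        rcases Nat.lt_or_ge j b with h | h
        · exact ⟨b, by omega, hb2, a, ha, hv, hk'⟩
        · -- b = j: impossible, no earlier occurrence of nums[j]
          exfalso
          have hbj : b = j := by omega
          exact ((hinv nums[j]).1 hdv a (by omega)) (by rw [hv, hbj, hvj])
    · -- value seen before, x is the greatest earlier index of nums[j]
      have hcont : d.contains nums[j] = true := by
        rw [PySem.Dict.contains_eq_isSome_get?, hdv]; rfl
      have hgd : d.getD nums[j] 0 = x := PySem.Dict.getD_of_get?_eq_some d 0 hdv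
      rcases (hinv nums[j]).2 x hdv with ⟨amax, rfl, hamj, hamv, hmax⟩
      by_cases hk' : (j : Int) - (amax : Int) ≤ k
      · simp only [altGo, hcont, hgd, hk', decide_true, Bool.and_self, if_true, true_iff]
        exact ⟨j, le_refl j, hj, amax, hamj, by rw [hamv, hvj], hk'⟩
      · simp only [altGo, hcont, hgd, hk', decide_false, Bool.and_false, Bool.false_eq_true,
          if_false]
        rw [hstep (d.insert nums[j] (j : Int)) (by omega)
          (by rw [← hvj]; exact InvB_insert nums j d hinv)]
        constructor
        · rintro ⟨b, hb1, hb2, a, ha, hv, hk''⟩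
          exact ⟨b, by omega, hb2, a, ha, hv, hk''⟩
        · rintro ⟨b, hb1, hb2, a, ha, hv, hk''⟩
          rcases Nat.lt_or_ge j b with h | h
          · exact ⟨b, by omega, hb2, a, ha, hv, hk''⟩
          · exfalso
            have hbj : b = j := by omega
            have hle : a ≤ amax := hmax a (by omega) (by rw [hv, hbj, hvj])
            exact hk' (by omega)
  
lemma B_iff (nums : List Int) (k : Int) :
    containsCloseNums_alt nums k = true ↔ ClosePair nums k := by
  unfold containsCloseNums_alt
  have hinv0 : InvB nums 0 PySem.Dict.empty := by
    intro v
    constructor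
    · intro _ a ha; omega
    · intro x hx
      rw [PySem.Dict.get?_empty] at hx
      exact absurd hx (by simp)
  have := altGo_iff nums k nums.length 0 PySem.Dict.empty (by omega) hinv0
  rw [List.drop_zero] at this
  rw [show ((0 : Nat) : Int) = 0 from rfl] at this
  rw [this]
  constructor
  · rintro ⟨b, -, hb, a, ha, hv, hk⟩
    exact ⟨a, b, ha, hb, hv, hk⟩
  · rintro ⟨a, b, ha, hb, hv, hk⟩
    exact ⟨b, by omega, hb, a, ha, hv, hk⟩

-- ===== VERDICT (by name: the statement is the Claim_ definition above) =====
theorem containsCloseNums_spec : Claim_equal_containsCloseNums := by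
  intro nums k _
  unfold Spec_containsCloseNums
  rw [Bool.eq_iff_iff, A_iff, B_iff]
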